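-- pv_equiv track=rewrite | github.com/kapicorp/kapitan | v2/src/kapitan/core/inventory_tui.py | _filter_suggestions
-- ===== SOURCE A (Python) =====
-- def _filter_suggestions(available_keys: list, partial_input: str) -> list:
--     """Filter available keys based on partial input for autocompletion."""
--     if not partial_input:
--         return available_keys
--
--     partial_lower = partial_input.lower()
--     filtered = []
--
--     # First, add exact matches
--     exact_matches = [key for key in available_keys if key.lower() == partial_lower]
--     filtered.extend(exact_matches)
--
--     # Then, add keys that start with the partial input
--     starts_with = [key for key in available_keys
--                   if key.lower().startswith(partial_lower) and key not in exact_matches]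
--     filtered.extend(starts_with)
--
--     # Finally, add keys that contain the partial input
--     contains = [key for key in available_keys
--                if partial_lower in key.lower() and key not in exact_matches and key not in starts_with]
--     filtered.extend(contains)
--
--     return filtered[:10]  # Limit to 10 suggestions
-- ===== SOURCE B (Python) =====
-- def _filter_suggestions(available_keys: list, partial_input: str) -> list:
--     """Filter available keys based on partial input for autocompletion."""
--     if not partial_input:
--         return available_keys
--
--     partial_lower = partial_input.lower()
--     exact, prefix, contains = [], [], []
--     for key in available_keys:
--         key_lower = key.lower()
--         if key_lower == partial_lower:
--             exact.append(key)
--         elif key_lower.startswith(partial_lower):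
--             prefix.append(key)
--         elif partial_lower in key_lower:
--             contains.append(key)
--     return (exact + prefix + contains)[:10]
-- ===== Notes on version B (the rewrite author's own statement) =====
-- stated objective: simpler
-- what changed: Replaces three full scans with 'key not in exact_matches'/'key not in starts_with' list-membership tests by a single pass that classifies each key into one of three ordered buckets, then concatenates and truncates.
import Mathlib
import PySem

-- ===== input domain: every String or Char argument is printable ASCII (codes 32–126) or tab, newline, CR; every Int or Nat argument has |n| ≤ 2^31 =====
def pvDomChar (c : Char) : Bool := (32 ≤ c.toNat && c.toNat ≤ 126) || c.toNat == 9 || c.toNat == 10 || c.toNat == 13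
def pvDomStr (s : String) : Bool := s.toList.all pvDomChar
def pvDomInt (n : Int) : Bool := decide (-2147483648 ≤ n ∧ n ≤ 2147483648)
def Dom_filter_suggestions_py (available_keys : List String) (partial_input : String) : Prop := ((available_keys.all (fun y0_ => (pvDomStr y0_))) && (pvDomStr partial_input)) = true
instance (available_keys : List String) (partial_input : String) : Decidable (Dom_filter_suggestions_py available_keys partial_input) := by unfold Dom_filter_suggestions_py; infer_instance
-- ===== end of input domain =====

-- B replaces A's three scans with list-membership tests ('key not in exact_matches')
-- by a single pass classifying each key into three ordered buckets; return values proved equal.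


-- ===== PORT A =====
def filter_suggestions_py (available_keys : List String) (partial_input : String) : List String :=
  if partial_input = "" then available_keys
  else
    let partial_lower := PySem.Str.lower partial_input
    let exact_matches := available_keys.filter (fun key => PySem.Str.lower key == partial_lower)
    let starts_with := available_keys.filter (fun key =>
      PySem.Str.startswith (PySem.Str.lower key) partial_lower && !(exact_matches.contains key))
    let contains := available_keys.filter (fun key =>
      PySem.Str.isIn partial_lower (PySem.Str.lower key) && !(exact_matches.contains key)
        && !(starts_with.contains key))
    PySem.List.slice (exact_matches ++ starts_with ++ contains) none (some 10)

-- ===== PORT B =====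
def fsAltStep (partial_lower : String)
    (acc : List String × List String × List String) (key : String) :
    List String × List String × List String :=
  let key_lower := PySem.Str.lower key
  if key_lower == partial_lower then (acc.1 ++ [key], acc.2.1, acc.2.2)
  else if PySem.Str.startswith key_lower partial_lower then (acc.1, acc.2.1 ++ [key], acc.2.2)
  else if PySem.Str.isIn partial_lower key_lower then (acc.1, acc.2.1, acc.2.2 ++ [key])
  else acc

def filter_suggestions_py_alt (available_keys : List String) (partial_input : String) : List String :=
  if partial_input = "" then available_keys
  else
    let partial_lower := PySem.Str.lower partial_input
    let buckets := available_keys.foldl (fsAltStep partial_lower) ([], [], [])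
    PySem.List.slice (buckets.1 ++ buckets.2.1 ++ buckets.2.2) none (some 10)

-- ===== PRECONDITION & SPEC =====
def Spec_filter_suggestions_py (available_keys : List String) (partial_input : String) (out : List String) : Prop := out = filter_suggestions_py_alt available_keys partial_input
instance (available_keys : List String) (partial_input : String) (out : List String) : Decidable (Spec_filter_suggestions_py available_keys partial_input out) := by unfold Spec_filter_suggestions_py; infer_instance

-- ===== CLAIM (what is proved, stated in full; the proofs are below) =====
def Claim_equal_filter_suggestions_py : Prop := ∀ (available_keys : List String) (partial_input : String), Dom_filter_suggestions_py available_keys partial_input → Spec_filter_suggestions_py available_keys partial_input (filter_suggestions_py available_keys partial_input)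

-- ===== LEMMAS AND PROOFS =====

-- Python 'k in filter(q, l)' for k drawn from l is just q k
theorem fs_contains_filter (q : String → Bool) (l : List String) (k : String) (hk : k ∈ l) :
    (l.filter q).contains k = q k := by
  simp [List.contains_eq_mem, List.mem_filter, hk]

-- exact match implies prefix match
theorem fs_exact_imp_starts (k pl : String) (h : (PySem.Str.lower k == pl) = true) :
    PySem.Str.startswith (PySem.Str.lower k) pl = true := by
  rw [eq_of_beq h]
  simp [PySem.Str.startswith, PySem.Chars.startswith_iff]

-- B's fold distributes over three classifying filters
theorem fs_fold_eq (pl : String) (l : List String) (e p c : List String) :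
    l.foldl (fsAltStep pl) (e, p, c) =
      (e ++ l.filter (fun k => PySem.Str.lower k == pl),
       p ++ l.filter (fun k => !(PySem.Str.lower k == pl)
              && PySem.Str.startswith (PySem.Str.lower k) pl),
       c ++ l.filter (fun k => !(PySem.Str.lower k == pl)
              && !(PySem.Str.startswith (PySem.Str.lower k) pl)
              && PySem.Str.isIn pl (PySem.Str.lower k))) := by
  induction l generalizing e p c with
  | nil => simp
  | cons x xs ih =>
    simp only [List.foldl_cons, List.filter_cons]
    by_cases h1 : (PySem.Str.lower x == pl) = true
    · simp [fsAltStep, h1, ih]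
    · by_cases h2 : PySem.Chars.startswith (PySem.Chars.lower x.toList) pl.toList = true
      · simp [fsAltStep, h1, h2, ih]
      · by_cases h3 : PySem.Chars.isIn pl.toList (PySem.Chars.lower x.toList) = true
        · simp [fsAltStep, h1, h2, h3, ih]
        · simp [fsAltStep, h1, h2, h3, ih]

-- ===== VERDICT (by name: the statement is the Claim_ definition above) =====
theorem filter_suggestions_py_spec : Claim_equal_filter_suggestions_py := by
  intro l pin _
  unfold Spec_filter_suggestions_py filter_suggestions_py filter_suggestions_py_alt
  by_cases hp : pin = ""
  · simp [hp]
  · simp only [hp, if_false]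
    rw [fs_fold_eq]
    simp only [List.nil_append]
    set pl := PySem.Str.lower pin with hpl
    have hs : l.filter (fun key =>
          PySem.Str.startswith (PySem.Str.lower key) pl
            && !((l.filter (fun key => PySem.Str.lower key == pl)).contains key))
        = l.filter (fun k => !(PySem.Str.lower k == pl)
            && PySem.Str.startswith (PySem.Str.lower k) pl) := by
      apply List.filter_congr
      intro k hk
      simp only [fs_contains_filter _ l k hk]
      exact Bool.and_comm _ _
    have hc : l.filter (fun key =>
          PySem.Str.isIn pl (PySem.Str.lower key)
            && !((l.filter (fun key => PySem.Str.lower key == pl)).contains key)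
            && !((l.filter (fun key =>
                  PySem.Str.startswith (PySem.Str.lower key) pl
                    && !((l.filter (fun key => PySem.Str.lower key == pl)).contains key))).contains key))
        = l.filter (fun k => !(PySem.Str.lower k == pl)
            && !(PySem.Str.startswith (PySem.Str.lower k) pl)
            && PySem.Str.isIn pl (PySem.Str.lower k)) := by
      apply List.filter_congr
      intro k hk
      simp only [fs_contains_filter _ l k hk]
      by_cases h1 : (PySem.Str.lower k == pl) = true
      · have := fs_exact_imp_starts k pl h1
        simp only [this] at *
        simp [h1]
      · by_cases h2 : PySem.Str.startswith (PySem.Str.lower k) pl = true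
        · simp only [h2] at *
          simp [h1]
        · simp only [Bool.not_eq_true] at h1 h2
          simp [h1, Bool.and_comm]
    rw [hs] at hc ⊢
    rw [hc]
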